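-- pv_equiv track=rewrite | github.com/shanereilly/projecteuler | python/problem5/5.py | simplifyList
-- ===== SOURCE A (Python) =====
-- import typing
--
-- def getFactors(n: int) -> typing.List[int]:
--     return [i for i in range(2, n) if n % i == 0]
--
-- def simplifyList(l: typing.List[int]) -> typing.List[int]:
--     toRemove = []
--     for i in l:
--         toRemove += getFactors(i)
--     for i in toRemove:
--         if i in l:
--             l.remove(i)
--     return l
-- ===== SOURCE B (Python) =====
-- def simplifyList(l):
--     # counted removals: one counter of all proper factors, then a single skip pass
--     rem = {}
--     for n in l:
--         for d in range(2, n):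
--             if n % d == 0:
--                 rem[d] = rem.get(d, 0) + 1
--     kept = []
--     for x in l:
--         if rem.get(x, 0) > 0:
--             rem[x] -= 1
--         else:
--             kept.append(x)
--     l[:] = kept
--     return l
-- ===== Notes on version B (the rewrite author's own statement) =====
-- stated objective: alternative
-- what changed: B never materialises the toRemove list and replaces A's removal loop (a linear 'in' scan plus list.remove per collected factor) by a factor counter built once and a single counted-skip pass over the list, preserving remove-first-occurrence semantics.
import Mathlib
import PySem

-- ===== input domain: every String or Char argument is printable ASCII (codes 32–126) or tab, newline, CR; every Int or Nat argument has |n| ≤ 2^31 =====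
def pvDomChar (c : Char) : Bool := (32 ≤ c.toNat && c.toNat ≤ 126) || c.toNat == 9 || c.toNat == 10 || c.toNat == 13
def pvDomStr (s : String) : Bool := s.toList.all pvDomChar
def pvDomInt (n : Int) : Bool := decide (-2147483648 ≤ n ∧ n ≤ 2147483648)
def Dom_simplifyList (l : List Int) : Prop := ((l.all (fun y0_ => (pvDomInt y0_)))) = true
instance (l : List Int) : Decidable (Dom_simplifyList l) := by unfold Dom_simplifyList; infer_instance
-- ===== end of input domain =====

-- B replaces A's repeated `in`/`remove` scans over the evolving list by one counter of all
-- proper factors and a single skip pass (objective: alternative / removal phase is linear).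
-- A mutates l in place; B performs the same final mutation via l[:] = kept, and the theorem
-- here is about the return value.

-- ===== PORT A =====
def getFactors (n : Int) : List Int :=
  (PySem.List.pyRange 2 n 1).filter (fun i => PySem.Int.mod n i == 0)

def simplifyList (l : List Int) : List Int :=
  let toRemove := l.foldl (fun acc i => acc ++ getFactors i) []
  toRemove.foldl (fun cur i =>
    if cur.contains i then (PySem.List.remove? cur i).getD cur else cur) l

-- ===== PORT B =====
-- rem[d] = rem.get(d, 0) + 1 over all d in range(2, n) dividing n
def pvAddFactors (n : Int) (r : PySem.Dict Int Int) : PySem.Dict Int Int :=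
  (PySem.List.pyRange 2 n 1).foldl
    (fun r d => if PySem.Int.mod n d == 0 then r.insert d (r.getD d 0 + 1) else r) r

def simplifyList_alt (l : List Int) : List Int :=
  let rem := l.foldl (fun r n => pvAddFactors n r) PySem.Dict.empty
  (l.foldl (fun (p : List Int × PySem.Dict Int Int) x =>
      if p.2.getD x 0 > 0 then (p.1, p.2.insert x (p.2.getD x 0 - 1))
      else (p.1 ++ [x], p.2)) ([], rem)).1

-- ===== PRECONDITION & SPEC =====
def Spec_simplifyList (l : List Int) (out : List Int) : Prop := out = simplifyList_alt l
instance (l : List Int) (out : List Int) : Decidable (Spec_simplifyList l out) := by unfold Spec_simplifyList; infer_instance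

-- ===== CLAIM (what is proved, stated in full; the proofs are below) =====
def Claim_equal_simplifyList : Prop := ∀ (l : List Int), Dom_simplifyList l → Spec_simplifyList l (simplifyList l)

-- ===== LEMMAS AND PROOFS =====

/-- Remove the first `c v` occurrences of each value `v` (counts capped at availability). -/
def pvEat (c : Int → Int) : List Int → List Int
  | [] => []
  | x :: xs => if c x > 0 then pvEat (fun v => if v = x then c x - 1 else c v) xs
               else x :: pvEat c xs

theorem pvEat_zero (c : Int → Int) (h : ∀ v, c v ≤ 0) : ∀ l, pvEat c l = l := by
  intro l
  induction l with
  | nil => rfl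
  | cons x xs ih => simp [pvEat, Int.not_lt.mpr (h x), ih]

/-- One guarded Python `remove` equals eating the indicator of `i`. -/
theorem pvRm_eq_eat (i : Int) : ∀ (cur : List Int),
    (if cur.contains i then (PySem.List.remove? cur i).getD cur else cur)
      = pvEat (fun v => if v = i then 1 else 0) cur := by
  intro cur
  induction cur with
  | nil => rfl
  | cons x xs ih =>
    by_cases hx : x = i
    · subst hx
      simp [pvEat, PySem.List.remove?_cons_self]
      exact (pvEat_zero _ (by intro v; by_cases h : v = x <;> simp [h]) xs).symm
    · have hc : (x :: xs).contains i = xs.contains i := by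
        simp [List.contains_cons, Ne.symm hx]
      by_cases hm : xs.contains i
      · have hmem : i ∈ xs := by simpa using hm
        obtain ⟨r, hr⟩ : ∃ r, PySem.List.remove? xs i = some r :=
          Option.ne_none_iff_exists'.mp (by simp [PySem.List.remove?_eq_none_iff, hmem])
        have : PySem.List.remove? (x :: xs) i = some (x :: r) := by
          rw [PySem.List.remove?_cons_of_ne xs hx, hr]; rfl
        simp only [hc, hm, if_true, this, Option.getD_some] at *
        simp [pvEat, hx, ← ih, hm, hr]
      · have h2 : PySem.List.remove? (x :: xs) i = none := by
          simp [PySem.List.remove?_eq_none_iff, List.mem_cons, hx, Ne.symm hx]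
          intro h; exact hm (by simpa using h)
        simp only [hc, hm, if_false] at *
        simp [pvEat, hx, ← ih, hm]

theorem pvEat_eat (l : List Int) : ∀ (c c' : Int → Int), (∀ v, 0 ≤ c v) → (∀ v, 0 ≤ c' v) →
    pvEat c (pvEat c' l) = pvEat (fun v => c v + c' v) l := by
  induction l with
  | nil => intro c c' _ _; rfl
  | cons x xs ih =>
    intro c c' hc hc'
    by_cases h' : c' x > 0
    · have hsum : (fun v => c v + c' v) x > 0 := by have := hc x; simp only; omega
      rw [pvEat, if_pos h', pvEat, if_pos hsum,
        ih c (fun v => if v = x then c' x - 1 else c' v) hc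
          (by intro v; by_cases hv : v = x
              · simp [hv]; omega
              · simp [hv]; exact hc' v)]
      congr 1
      funext v; by_cases hv : v = x <;> simp [hv]; omega
    · have h'0 : c' x = 0 := le_antisymm (by omega) (hc' x)
      by_cases h : c x > 0
      · have hsum : (fun v => c v + c' v) x > 0 := by simp only; omega
        rw [pvEat, if_neg h', pvEat, if_pos h, pvEat, if_pos hsum,
          ih (fun v => if v = x then c x - 1 else c v) c'
            (by intro v; by_cases hv : v = x
                · simp [hv]; omega
                · simp [hv]; exact hc v) hc']
        congr 1
        funext v; by_cases hv : v = x <;> simp [hv, h'0]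
      · have hsum : ¬ ((fun v => c v + c' v) x > 0) := by simp only; omega
        rw [pvEat, if_neg h', pvEat, if_neg h, pvEat, if_neg hsum, ih c c' hc hc']

/-- A's removal loop eats the occurrence counts of `toRemove`. -/
theorem pvFoldRm_eq_eat : ∀ (t l : List Int),
    t.foldl (fun cur i =>
      if cur.contains i then (PySem.List.remove? cur i).getD cur else cur) l
      = pvEat (fun v => (t.count v : Int)) l := by
  intro t
  induction t with
  | nil =>
    intro l
    simp only [List.foldl_nil]
    exact (pvEat_zero _ (by intro v; simp) l).symm
  | cons i t ih =>
    intro l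
    rw [List.foldl_cons, ih, pvRm_eq_eat,
      pvEat_eat l _ _ (by intro v; positivity) (by intro v; by_cases h : v = i <;> simp [h])]
    congr 1
    funext v
    by_cases h : v = i <;> simp [List.count_cons, h] <;> push_cast <;> omega

theorem getD_foldl_bump (p : Int → Bool) (v : Int) : ∀ (xs : List Int) (r : PySem.Dict Int Int),
    (xs.foldl (fun r d => if p d then r.insert d (r.getD d 0 + 1) else r) r).getD v 0
      = r.getD v 0 + ((xs.filter p).count v : Int) := by
  intro xs
  induction xs with
  | nil => intro r; simp
  | cons d xs ih =>
    intro r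
    by_cases hp : p d
    · rw [List.foldl_cons, if_pos hp, ih, PySem.Dict.getD_insert]
      by_cases hv : v = d <;> simp [List.filter_cons, hp, List.count_cons, hv] <;> push_cast <;> omega
    · rw [List.foldl_cons, if_neg hp, ih]
      simp [List.filter_cons, hp]

theorem getD_addFactors (n v : Int) (r : PySem.Dict Int Int) :
    (pvAddFactors n r).getD v 0 = r.getD v 0 + ((getFactors n).count v : Int) := by
  rw [pvAddFactors, getD_foldl_bump]; rfl

theorem getD_remFold (v : Int) : ∀ (l : List Int) (r : PySem.Dict Int Int),
    (l.foldl (fun r n => pvAddFactors n r) r).getD v 0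
      = r.getD v 0 + ((l.flatMap getFactors).count v : Int) := by
  intro l
  induction l with
  | nil => intro r; simp
  | cons n l ih =>
    intro r
    rw [List.foldl_cons, ih, getD_addFactors]
    simp [List.count_append]
    push_cast; ring

theorem toRemove_eq_flatMap : ∀ (l acc : List Int),
    l.foldl (fun acc i => acc ++ getFactors i) acc = acc ++ l.flatMap getFactors := by
  intro l
  induction l with
  | nil => intro acc; simp
  | cons i l ih => intro acc; rw [List.foldl_cons, ih]; simp

theorem pvPass_eq_eat : ∀ (xs acc : List Int) (r : PySem.Dict Int Int),
    (xs.foldl (fun (p : List Int × PySem.Dict Int Int) x =>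
        if p.2.getD x 0 > 0 then (p.1, p.2.insert x (p.2.getD x 0 - 1))
        else (p.1 ++ [x], p.2)) (acc, r)).1
      = acc ++ pvEat (fun v => r.getD v 0) xs := by
  intro xs
  induction xs with
  | nil => intro acc r; simp [pvEat]
  | cons x xs ih =>
    intro acc r
    by_cases h : r.getD x 0 > 0
    · rw [List.foldl_cons, if_pos h, ih, pvEat, if_pos h]
      congr 2
      funext v
      rw [PySem.Dict.getD_insert]
    · rw [List.foldl_cons, if_neg h, ih, pvEat, if_neg h]
      simp

-- ===== VERDICT (by name: the statement is the Claim_ definition above) =====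
theorem simplifyList_spec : Claim_equal_simplifyList := by
  intro l _
  show simplifyList l = simplifyList_alt l
  rw [simplifyList, simplifyList_alt, toRemove_eq_flatMap, List.nil_append,
    pvFoldRm_eq_eat, pvPass_eq_eat, List.nil_append]
  congr 1
  funext v
  rw [getD_remFold]
  simp
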